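-- pv_equiv track=rewrite | github.com/quarantin/imperial-probe-droid | cmd/general/gregister.py | lowerstrip
-- ===== SOURCE A (Python) =====
-- def lowerstrip(string):
--
-- 	if not string:
-- 		return ''
--
-- 	replaceable = {
-- 		' ': '',
-- 		'-': '',
-- 		'_': '',
-- 	}
--
-- 	string = string.lower()
-- 	for pattern, replace in replaceable.items():
-- 		string = string.replace(pattern, replace)
--
-- 	return string
-- ===== SOURCE B (Python) =====
-- def lowerstrip(string):
--
-- 	if not string:
-- 		return ''
--
-- 	return ''.join(c for c in string.lower() if c not in {' ', '-', '_'})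
-- ===== Notes on version B (the rewrite author's own statement) =====
-- stated objective: simpler
-- what changed: Replaces the pattern-dictionary plus three sequential whole-string replace passes with one single pass over the characters of the lowered string, joining those that are not a space, dash or underscore.
import Mathlib
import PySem

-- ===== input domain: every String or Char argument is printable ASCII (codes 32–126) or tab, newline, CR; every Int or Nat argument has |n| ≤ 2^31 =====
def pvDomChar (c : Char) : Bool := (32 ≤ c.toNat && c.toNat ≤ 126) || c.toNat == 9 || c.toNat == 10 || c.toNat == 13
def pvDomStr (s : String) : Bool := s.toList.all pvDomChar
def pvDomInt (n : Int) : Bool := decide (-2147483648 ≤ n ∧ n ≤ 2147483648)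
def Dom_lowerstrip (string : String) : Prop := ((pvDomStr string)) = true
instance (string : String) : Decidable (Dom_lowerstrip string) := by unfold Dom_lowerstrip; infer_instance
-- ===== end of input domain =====

-- B replaces the pattern-dictionary plus three sequential whole-string replace passes
-- with one single pass over the lowered characters, keeping the characters that are not a space, dash or underscore (simpler).

-- ===== PORT A =====
def lowerstrip (string : String) : String :=
  if string == "" then ""
  else
    let replaceable : PySem.Dict String String :=
      PySem.Dict.mk [(" ", ""), ("-", ""), ("_", "")]
    let string := PySem.Str.lower string
    replaceable.items.foldl (fun s pr => PySem.Str.replace s pr.1 pr.2) string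

-- ===== PORT B =====
def lowerstrip_alt (string : String) : String :=
  if string == "" then ""
  else
    String.ofList ((PySem.Str.lower string).toList.filter
      (fun c => !(c == ' ' || c == '-' || c == '_')))

-- ===== PRECONDITION & SPEC =====
def Spec_lowerstrip (string : String) (out : String) : Prop := out = lowerstrip_alt string
instance (string : String) (out : String) : Decidable (Spec_lowerstrip string out) := by unfold Spec_lowerstrip; infer_instance

-- ===== CLAIM (what is proved, stated in full; the proofs are below) =====
def Claim_equal_lowerstrip : Prop := ∀ (string : String), Dom_lowerstrip string → Spec_lowerstrip string (lowerstrip string)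

-- ===== LEMMAS AND PROOFS =====

-- replace.go with a single-character pattern and empty replacement is a filter
theorem replace_go_single (c : Char) (fuel : Nat) (l acc : List Char)
    (h : l.length ≤ fuel) :
    PySem.Chars.replace.go [c] [] fuel l acc = acc.reverse ++ l.filter (fun a => a ≠ c) := by
  induction fuel generalizing l acc with
  | zero =>
    cases l with
    | nil => simp [PySem.Chars.replace.go]
    | cons a t => simp at h
  | succ n ih =>
    cases l with
    | nil => simp [PySem.Chars.replace.go]
    | cons a t =>
      simp only [List.length_cons, Nat.succ_le_succ_iff] at h
      by_cases hac : a = c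
      · subst hac
        have hpre : List.isPrefixOf [a] (a :: t) = true := by
          simp [List.isPrefixOf]
        rw [PySem.Chars.replace.go]
        simp only [hpre, if_pos]
        simpa using ih t acc h
      · have hpre : List.isPrefixOf [c] (a :: t) = false := by
          simp [List.isPrefixOf]
          exact fun h' => hac h'.symm
        rw [PySem.Chars.replace.go]
        simp only [hpre, Bool.false_eq_true, if_neg, not_false_iff]
        rw [ih t (a :: acc) h]
        simp [hac]

theorem replace_single (c : Char) (l : List Char) :
    PySem.Chars.replace l [c] [] = l.filter (fun a => a ≠ c) := by
  rw [PySem.Chars.replace]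
  simp only [List.isEmpty_cons, Bool.false_eq_true, if_neg, not_false_iff]
  simpa using replace_go_single c l.length l [] le_rfl

-- ===== VERDICT (by name: the statement is the Claim_ definition above) =====
theorem lowerstrip_spec : Claim_equal_lowerstrip := by
  intro s _
  unfold Spec_lowerstrip lowerstrip lowerstrip_alt
  by_cases hs : s == ""
  · simp [hs]
  · simp only [hs, Bool.false_eq_true, if_neg, not_false_iff]
    apply String.ext
    have hL : ∀ (t : String) (c : Char),
        (PySem.Str.replace t (String.ofList [c]) "").toList
          = t.toList.filter (fun a => a ≠ c) := by
      intro t c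
      rw [PySem.Str.toList_replace]
      simp only [String.toList_ofList]
      exact replace_single c t.toList
    show (PySem.Str.replace (PySem.Str.replace (PySem.Str.replace
        (PySem.Str.lower s) " " "") "-" "") "_" "").toList = _
    have h1 : (" " : String) = String.ofList [' '] := rfl
    have h2 : ("-" : String) = String.ofList ['-'] := rfl
    have h3 : ("_" : String) = String.ofList ['_'] := rfl
    rw [h1, h2, h3, hL, hL, hL]
    simp only [List.filter_filter, String.toList_ofList]
    apply List.filter_congr
    intro a _
    by_cases e1 : a = ' ' <;> by_cases e2 : a = '-' <;> by_cases e3 : a = '_' <;>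
      simp [e1, e2, e3]
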